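-- pv_equiv track=rewrite | github.com/PamminaJyothirmayi/PythonWork | Words_Combination.py | combination_word
-- ===== SOURCE A (Python) =====
-- def combination_word(words):
--     words = sorted(words) #['cricket', 'plays', 'raju']
--     items = list(range(len(words))) #[0, 1, 2]
--
--     #c1 = [[i] for i in items]
--     c1 = []     #[[0], [1], [2]]
--     for i in items:
--         c1.append([i])
--
--     c2 = []    #[[0, 1], [0, 2], [1, 2]]
--     for c in c1:
--         for i in items:
--             if i > c[-1]:
--                 c2.append(c + [i])
--
--     c3 = []    #[[0, 1], [0, 2], [1, 2]]
--     for c in c2: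
--         for i in items:
--             if i > c[-1]:
--                 c3.append(c + [i])
--
--     w_c1 = [] #[('cricket', 'plays'), ('cricket', 'raju'), ('plays', 'raju')]
--     for c in c3:
--         w_c2 = []  #['cricket', 'plays'] ['cricket', 'raju'] ['plays', 'raju']
--         for index in c:
--             w_c2.append(words[index])
--         w_c1.append(tuple(w_c2))
--     return sorted(set(w_c1))
-- ===== SOURCE B (Python) =====
-- def combination_word(words):
--     words = sorted(words)
--     n = len(words)
--     found = set()
--     for i in range(n):
--         for j in range(i + 1, n):
--             for k in range(j + 1, n):
--                 found.add((words[i], words[j], words[k]))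
--     return sorted(found)
-- ===== Notes on version B (the rewrite author's own statement) =====
-- stated objective: simpler
-- what changed: Replaces A's level-by-level construction of index-combination lists c1/c2/c3 (each built by scanning all indices and filtering) plus a separate index-to-word mapping pass with one fused triple-nested index loop that inserts word triples directly into a set.
import Mathlib
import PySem

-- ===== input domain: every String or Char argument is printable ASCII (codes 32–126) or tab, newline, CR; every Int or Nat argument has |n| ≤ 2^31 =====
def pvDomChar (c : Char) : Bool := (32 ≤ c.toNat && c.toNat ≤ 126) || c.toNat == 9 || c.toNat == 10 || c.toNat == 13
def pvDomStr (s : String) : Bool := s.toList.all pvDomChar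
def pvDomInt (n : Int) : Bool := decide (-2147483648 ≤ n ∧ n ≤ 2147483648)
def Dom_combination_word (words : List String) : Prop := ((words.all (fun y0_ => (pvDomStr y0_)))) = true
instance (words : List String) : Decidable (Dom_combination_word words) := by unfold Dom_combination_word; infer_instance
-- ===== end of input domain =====

-- B fuses A's level-by-level c1/c2/c3 index-combination building and its separate index→word
-- mapping pass into one triple-nested index loop adding word triples directly to a set (objective: simpler).

-- ===== PORT A =====
-- c[-1] is ported by pyGet? at -1 (with getD 0); in A it is only evaluated on nonempty index lists, where it is exact.
-- words[index] with index drawn from range(len(words)) is always in range; pyGetD is exact there.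
def combination_word (words : List String) : List (List String) :=
  let ws := PySem.List.sorted words (fun x => x) false
  let items := PySem.List.pyRange 0 (ws.length : Int) 1
  let c1 := items.foldl (fun acc i => acc ++ [[i]]) ([] : List (List Int))
  let c2 := c1.foldl (fun acc c =>
      items.foldl (fun acc2 i =>
        if (PySem.List.pyGet? c (-1)).getD 0 < i then acc2 ++ [c ++ [i]] else acc2) acc) []
  let c3 := c2.foldl (fun acc c =>
      items.foldl (fun acc2 i =>
        if (PySem.List.pyGet? c (-1)).getD 0 < i then acc2 ++ [c ++ [i]] else acc2) acc) []
  let w_c1 := c3.foldl (fun acc c =>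
      acc ++ [c.foldl (fun w idx => w ++ [PySem.List.pyGetD ws idx ""]) []]) []
  PySem.List.sorted (PySem.Set.ofList w_c1) (fun x => x) false

-- ===== PORT B =====
-- words[i] with i drawn from range(n) is always in range; pyGetD is exact there.
def combination_word_alt (words : List String) : List (List String) :=
  let ws := PySem.List.sorted words (fun x => x) false
  let n : Int := ws.length
  let found : PySem.Set (List String) :=
    (PySem.List.pyRange 0 n 1).foldl (fun s i =>
      (PySem.List.pyRange (i + 1) n 1).foldl (fun s j =>
        (PySem.List.pyRange (j + 1) n 1).foldl (fun s k =>
          PySem.Set.add s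
            [PySem.List.pyGetD ws i "", PySem.List.pyGetD ws j "", PySem.List.pyGetD ws k ""]) s) s)
      PySem.Set.empty
  PySem.List.sorted found (fun x => x) false

-- ===== PRECONDITION & SPEC =====
def Spec_combination_word (words : List String) (out : List (List String)) : Prop := out = combination_word_alt words
instance (words : List String) (out : List (List String)) : Decidable (Spec_combination_word words out) := by unfold Spec_combination_word; infer_instance

-- ===== CLAIM (what is proved, stated in full; the proofs are below) =====
def Claim_equal_combination_word : Prop := ∀ (words : List String), Dom_combination_word words → Spec_combination_word words (combination_word words)

-- ===== LEMMAS AND PROOFS =====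

-- the list of word triples both programs enumerate, in the common enumeration order
def tripleList (ws : List String) : List (List String) :=
  (PySem.List.pyRange 0 (ws.length : Int) 1).flatMap (fun i =>
    (PySem.List.pyRange (i + 1) (ws.length : Int) 1).flatMap (fun j =>
      (PySem.List.pyRange (j + 1) (ws.length : Int) 1).map (fun k =>
        [PySem.List.pyGetD ws i "", PySem.List.pyGetD ws j "", PySem.List.pyGetD ws k ""])))

-- range(n) filtered by (j < ·) is range(j+1, n), for 0 ≤ j
lemma filter_pyRange (n : Nat) (j : Int) (hj : 0 ≤ j) :
    (PySem.List.pyRange 0 (n : Int) 1).filter (fun i => decide (j < i))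
      = PySem.List.pyRange (j + 1) (n : Int) 1 := by
  induction n with
  | zero =>
      rw [PySem.List.pyRange_one_eq_nil (by norm_num), PySem.List.pyRange_one_eq_nil (by omega)]
      rfl
  | succ m ih =>
      have hcast : ((m + 1 : Nat) : Int) = (m : Int) + 1 := by push_cast; ring
      rw [hcast, PySem.List.pyRange_one_succ_right (by positivity), List.filter_append, ih]
      by_cases h : j + 1 ≤ (m : Int)
      · rw [PySem.List.pyRange_one_succ_right h]
        simp [show j < (m : Int) by omega]
      · rw [PySem.List.pyRange_one_eq_nil (show (m : Int) ≤ j + 1 by omega),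
            PySem.List.pyRange_one_eq_nil (show (m : Int) + 1 ≤ j + 1 by omega)]
        simp [show ¬ j < (m : Int) by omega]

-- A's 'for c in …: for i in items: if i > c[-1]: out.append(c + [i])' loop, characterized
lemma loop2 (items : List Int) (cs : List (List Int)) (init : List (List Int)) :
    cs.foldl (fun acc c => items.foldl (fun acc2 i =>
      if (PySem.List.pyGet? c (-1)).getD 0 < i then acc2 ++ [c ++ [i]] else acc2) acc) init
  = init ++ cs.flatMap (fun c =>
      (items.filter (fun i => decide ((PySem.List.pyGet? c (-1)).getD 0 < i))).map
        (fun i => c ++ [i])) := by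
  have h1 : ∀ (c : List Int) (acc : List (List Int)),
      items.foldl (fun acc2 i =>
        if (PySem.List.pyGet? c (-1)).getD 0 < i then acc2 ++ [c ++ [i]] else acc2) acc
      = acc ++ (items.filter (fun i => decide ((PySem.List.pyGet? c (-1)).getD 0 < i))).map
          (fun i => c ++ [i]) := by
    intro c acc
    simpa using PySem.List.foldl_append_if
      (fun i => decide ((PySem.List.pyGet? c (-1)).getD 0 < i)) (fun i => c ++ [i]) items acc
  rw [PySem.List.foldl_congr_mem cs _ _ init (fun acc c _ => h1 c acc)]
  exact PySem.List.foldl_append_eq_flatMap _ cs init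

-- a fold of set-updates is one set-update by the concatenation
lemma foldl_update_flatMap {α β : Type} [BEq β] (l : List α) (g : α → List β) (s : PySem.Set β) :
    l.foldl (fun acc x => PySem.Set.update acc (g x)) s = PySem.Set.update s (l.flatMap g) := by
  induction l generalizing s with
  | nil => rfl
  | cons a t ih =>
      rw [List.foldl_cons, ih, List.flatMap_cons]
      simp [PySem.Set.update, List.foldl_append]

-- A's pipeline produces exactly tripleList (before set/sort)
lemma A_char (ws : List String) :
    (((((PySem.List.pyRange 0 (ws.length : Int) 1).foldl
          (fun acc i => acc ++ [[i]]) ([] : List (List Int))).foldl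
        (fun acc c => (PySem.List.pyRange 0 (ws.length : Int) 1).foldl (fun acc2 i =>
          if (PySem.List.pyGet? c (-1)).getD 0 < i then acc2 ++ [c ++ [i]] else acc2) acc) []).foldl
        (fun acc c => (PySem.List.pyRange 0 (ws.length : Int) 1).foldl (fun acc2 i =>
          if (PySem.List.pyGet? c (-1)).getD 0 < i then acc2 ++ [c ++ [i]] else acc2) acc) []).foldl
        (fun acc c => acc ++ [c.foldl (fun w idx => w ++ [PySem.List.pyGetD ws idx ""]) []]) [])
    = tripleList ws := by
  have e1 : (PySem.List.pyRange 0 (ws.length : Int) 1).foldl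
      (fun acc i => acc ++ [[i]]) ([] : List (List Int))
      = (PySem.List.pyRange 0 (ws.length : Int) 1).map (fun i => [i]) := by
    rw [PySem.List.foldl_append_singleton_eq_map]; rfl
  rw [e1]
  have e2 : ((PySem.List.pyRange 0 (ws.length : Int) 1).map (fun i => [i])).foldl
      (fun acc c => (PySem.List.pyRange 0 (ws.length : Int) 1).foldl (fun acc2 i =>
        if (PySem.List.pyGet? c (-1)).getD 0 < i then acc2 ++ [c ++ [i]] else acc2) acc) []
      = (PySem.List.pyRange 0 (ws.length : Int) 1).flatMap (fun i =>
          (PySem.List.pyRange (i + 1) (ws.length : Int) 1).map (fun j => [i, j])) := by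
    rw [loop2, List.nil_append, List.flatMap_map]
    refine List.flatMap_congr ?_
    intro i hi
    have h0 : (0 : Int) ≤ i := (PySem.List.mem_pyRange_one.1 hi).1
    rw [show ∀ l : List Int, l.filter
          (fun x => decide ((PySem.List.pyGet? [i] (-1)).getD 0 < x))
        = l.filter (fun x => decide (i < x)) from fun l => by
      simp [PySem.List.pyGet?_neg_one]]
    rw [filter_pyRange ws.length i h0]
    simp
  rw [e2]
  have e3 : ((PySem.List.pyRange 0 (ws.length : Int) 1).flatMap (fun i =>
        (PySem.List.pyRange (i + 1) (ws.length : Int) 1).map (fun j => [i, j]))).foldl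
      (fun acc c => (PySem.List.pyRange 0 (ws.length : Int) 1).foldl (fun acc2 i =>
        if (PySem.List.pyGet? c (-1)).getD 0 < i then acc2 ++ [c ++ [i]] else acc2) acc) []
      = (PySem.List.pyRange 0 (ws.length : Int) 1).flatMap (fun i =>
          (PySem.List.pyRange (i + 1) (ws.length : Int) 1).flatMap (fun j =>
            (PySem.List.pyRange (j + 1) (ws.length : Int) 1).map (fun k => [i, j, k]))) := by
    rw [loop2, List.nil_append, List.flatMap_assoc]
    refine List.flatMap_congr ?_
    intro i hi
    have h0i : (0 : Int) ≤ i := (PySem.List.mem_pyRange_one.1 hi).1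
    rw [List.flatMap_map]
    refine List.flatMap_congr ?_
    intro j hj
    have h0j : (0 : Int) ≤ j := by
      have := (PySem.List.mem_pyRange_one.1 hj).1; omega
    rw [show ∀ l : List Int, l.filter
          (fun x => decide ((PySem.List.pyGet? [i, j] (-1)).getD 0 < x))
        = l.filter (fun x => decide (j < x)) from fun l => by
      simp [PySem.List.pyGet?_neg_one]]
    rw [filter_pyRange ws.length j h0j]
    simp
  rw [e3]
  rw [PySem.List.foldl_append_singleton_eq_map, List.nil_append]
  unfold tripleList
  rw [List.map_flatMap]
  refine List.flatMap_congr fun i _ => ?_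
  rw [List.map_flatMap]
  refine List.flatMap_congr fun j _ => ?_
  rw [List.map_map]
  exact List.map_congr_left fun k _ => rfl
-- B's triple loop builds set(tripleList)
lemma B_char (ws : List String) :
    ((PySem.List.pyRange 0 (ws.length : Int) 1).foldl (fun s i =>
      (PySem.List.pyRange (i + 1) (ws.length : Int) 1).foldl (fun s j =>
        (PySem.List.pyRange (j + 1) (ws.length : Int) 1).foldl (fun s k =>
          PySem.Set.add s
            [PySem.List.pyGetD ws i "", PySem.List.pyGetD ws j "", PySem.List.pyGetD ws k ""]) s) s)
      PySem.Set.empty)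
    = PySem.Set.ofList (tripleList ws) := by
  have hk : ∀ (i j : Int) (s : PySem.Set (List String)),
      (PySem.List.pyRange (j + 1) (ws.length : Int) 1).foldl (fun s k =>
        PySem.Set.add s
          [PySem.List.pyGetD ws i "", PySem.List.pyGetD ws j "", PySem.List.pyGetD ws k ""]) s
      = PySem.Set.update s ((PySem.List.pyRange (j + 1) (ws.length : Int) 1).map (fun k =>
          [PySem.List.pyGetD ws i "", PySem.List.pyGetD ws j "", PySem.List.pyGetD ws k ""])) := by
    intro i j s
    simp [PySem.Set.update, List.foldl_map]
  have hj : ∀ (i : Int) (s : PySem.Set (List String)),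
      (PySem.List.pyRange (i + 1) (ws.length : Int) 1).foldl (fun s j =>
        (PySem.List.pyRange (j + 1) (ws.length : Int) 1).foldl (fun s k =>
          PySem.Set.add s
            [PySem.List.pyGetD ws i "", PySem.List.pyGetD ws j "", PySem.List.pyGetD ws k ""]) s) s
      = PySem.Set.update s ((PySem.List.pyRange (i + 1) (ws.length : Int) 1).flatMap (fun j =>
          (PySem.List.pyRange (j + 1) (ws.length : Int) 1).map (fun k =>
            [PySem.List.pyGetD ws i "", PySem.List.pyGetD ws j "", PySem.List.pyGetD ws k ""]))) := by
    intro i s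
    rw [PySem.List.foldl_congr_mem _ _ _ s (fun s j _ => hk i j s)]
    exact foldl_update_flatMap _ _ s
  rw [PySem.List.foldl_congr_mem _ _ _ PySem.Set.empty (fun s i _ => hj i s)]
  rw [foldl_update_flatMap]
  rw [PySem.Set.ofList_eq_foldl]
  rfl

theorem combination_word_spec : Claim_equal_combination_word := by
  intro words _
  unfold Spec_combination_word
  simp only [combination_word, combination_word_alt]
  rw [A_char, B_char]
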